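-- pv_equiv track=rewrite | github.com/rjherrera/IIC1103 | Labs/L04/4.py | factoresp
-- ===== SOURCE A (Python) =====
-- def es_primo(x):
--     esprimo=True
--     n=2
--     while esprimo and n<x:
--         a=x%n
--         if a==0:
--             esprimo=False
--         n+=1
--     if x==1:
--         esprimo=False
--     return(esprimo)
--
-- def factoresp(n):
--     i=n-1
--     factores=[]
--     while i>0:
--         if n%i==0 and es_primo(i):
--             factores.append(i)
--         i-=1
--     return(factores)
-- ===== SOURCE B (Python) =====
-- def factoresp(n):
--     # Collect prime divisors ascending: a candidate divisor d is prime iff no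
--     # previously collected (smaller) prime divisor divides it; then reverse for descending order.
--     factores = []
--     d = 2
--     while d < n:
--         if n % d == 0 and all(d % p != 0 for p in factores):
--             factores.append(d)
--         d += 1
--     factores.reverse()
--     return factores
-- ===== Notes on version B (the rewrite author's own statement) =====
-- stated objective: alternative
-- what changed: Instead of scanning i = n-1..1 and running a standalone trial-division primality test on every divisor candidate, B scans upward once and decides primality of each divisor d by checking d for divisibility against the smaller prime divisors already collected, then reverses the list.
import Mathlib
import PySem

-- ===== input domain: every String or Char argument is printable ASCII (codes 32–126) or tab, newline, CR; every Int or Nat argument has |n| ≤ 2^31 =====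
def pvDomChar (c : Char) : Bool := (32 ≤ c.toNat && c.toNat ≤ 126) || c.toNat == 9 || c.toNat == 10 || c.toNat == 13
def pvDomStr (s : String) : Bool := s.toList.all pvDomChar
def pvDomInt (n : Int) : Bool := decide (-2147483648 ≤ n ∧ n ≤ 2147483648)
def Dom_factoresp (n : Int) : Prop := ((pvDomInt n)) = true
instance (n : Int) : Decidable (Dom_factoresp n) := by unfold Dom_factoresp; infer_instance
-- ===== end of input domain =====

-- B replaces A's per-candidate O(i) primality test by a divisibility check against the
-- already-collected smaller prime divisors (ascending scan, then reverse).

-- ===== PORT A =====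
-- while esprimo and n<x: a=x%n; if a==0: esprimo=False; n+=1
def esPrimoLoop (x n : Int) (esprimo : Bool) : Bool :=
  if h : esprimo = true ∧ n < x then
    esPrimoLoop x (n + 1) (if PySem.Int.mod x n == 0 then false else esprimo)
  else esprimo
termination_by (x - n).toNat
decreasing_by omega

def es_primo (x : Int) : Bool :=
  let esprimo := esPrimoLoop x 2 true
  if x == 1 then false else esprimo

-- while i>0: if n%i==0 and es_primo(i): factores.append(i); i-=1
def facLoopA (n i : Int) (factores : List Int) : List Int :=
  if h : 0 < i then
    facLoopA n (i - 1)
      (if PySem.Int.mod n i == 0 && es_primo i then factores ++ [i] else factores)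
  else factores
termination_by i.toNat
decreasing_by omega

def factoresp (n : Int) : List Int := facLoopA n (n - 1) []

-- ===== PORT B =====
-- while d < n: if n%d==0 and all(d%p!=0 for p in factores): factores.append(d); d+=1
def facLoopB (n d : Int) (factores : List Int) : List Int :=
  if h : d < n then
    facLoopB n (d + 1)
      (if PySem.Int.mod n d == 0 && factores.all (fun p => !(PySem.Int.mod d p == 0))
       then factores ++ [d] else factores)
  else factores
termination_by (n - d).toNat
decreasing_by omega

def factoresp_alt (n : Int) : List Int := (facLoopB n 2 []).reverse

-- ===== PRECONDITION & SPEC =====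
def Spec_factoresp (n : Int) (out : List Int) : Prop := out = factoresp_alt n
instance (n : Int) (out : List Int) : Decidable (Spec_factoresp n out) := by unfold Spec_factoresp; infer_instance

-- ===== CLAIM (what is proved, stated in full; the proofs are below) =====
def Claim_equal_factoresp : Prop := ∀ (n : Int), Dom_factoresp n → Spec_factoresp n (factoresp n)

-- ===== LEMMAS AND PROOFS =====

-- "no divisor k with 2 ≤ k < x": the property es_primo decides
def NoDiv (x : Int) : Prop := ∀ k : Int, 2 ≤ k → k < x → ¬ k ∣ x

-- the common filter condition (A's loop test)
def condC (n p : Int) : Bool := PySem.Int.mod n p == 0 && es_primo p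

lemma esPrimoLoop_false (x n : Int) : esPrimoLoop x n false = false := by
  rw [esPrimoLoop]; simp

lemma esPrimoLoop_true_iff (x n : Int) :
    esPrimoLoop x n true = true ↔ ∀ k : Int, n ≤ k → k < x → ¬ k ∣ x := by
  by_cases h : n < x
  · rw [esPrimoLoop, dif_pos ⟨rfl, h⟩]
    by_cases hd : PySem.Int.mod x n = 0
    · have hdvd : n ∣ x := (PySem.Int.mod_eq_zero_iff_dvd x n).mp hd
      rw [if_pos (by simpa using hd), esPrimoLoop_false]
      constructor
      · intro hf; cases hf
      · intro hall; exact absurd hdvd (hall n le_rfl h)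
    · rw [if_neg (by simpa using hd), esPrimoLoop_true_iff x (n + 1)]
      constructor
      · intro hall k hk1 hk2 hkd
        rcases eq_or_lt_of_le hk1 with heq | hlt
        · exact hd ((PySem.Int.mod_eq_zero_iff_dvd x n).mpr (heq ▸ hkd))
        · exact hall k (by omega) hk2 hkd
      · intro hall k hk1 hk2; exact hall k (by omega) hk2
  · rw [esPrimoLoop, dif_neg (fun hc => h hc.2)]
    constructor
    · intro _ k hk1 hk2 _; omega
    · intro _; rfl
termination_by (x - n).toNat
decreasing_by omega

lemma es_primo_iff (x : Int) (hx : 2 ≤ x) : es_primo x = true ↔ NoDiv x := by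
  have h1 : (x == 1) = false := by simp; omega
  simp only [es_primo, h1, Bool.false_eq_true, if_false]
  rw [esPrimoLoop_true_iff]
  exact Iff.rfl

lemma es_primo_one : es_primo 1 = false := by decide

-- a non-NoDiv number ≥ 2 has a NoDiv divisor k with 2 ≤ k < it
lemma exists_noDiv_divisor :
    ∀ (m : Nat) (d : Int), d.toNat ≤ m → 2 ≤ d → ¬ NoDiv d →
      ∃ k : Int, 2 ≤ k ∧ k < d ∧ k ∣ d ∧ NoDiv k := by
  intro m
  induction m with
  | zero => intro d hm hd _; omega
  | succ m ih =>
    intro d hm hd hnd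
    unfold NoDiv at hnd; push_neg at hnd
    obtain ⟨k, hk2, hkd, hdvd⟩ := hnd
    by_cases hk : NoDiv k
    · exact ⟨k, hk2, hkd, hdvd, hk⟩
    · obtain ⟨j, hj2, hjk, hjdvd, hjnd⟩ := ih k (by omega) hk2 hk
      exact ⟨j, hj2, by omega, hjdvd.trans hdvd, hjnd⟩

-- loop A characterization: descending collection = reverse of ascending filter
lemma facLoopA_eq (n : Int) :
    ∀ (i : Int) (acc : List Int),
      facLoopA n i acc = acc ++ ((PySem.List.pyRange 1 (i + 1) 1).filter (condC n)).reverse := by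
  intro i acc
  by_cases h : 0 < i
  · rw [facLoopA, dif_pos h, facLoopA_eq n (i - 1)]
    rw [show i - 1 + 1 = i by ring]
    rw [PySem.List.pyRange_one_succ_right (show (1 : Int) ≤ i by omega)]
    rw [List.filter_append, List.reverse_append]
    cases hc : (PySem.Int.mod n i == 0 && es_primo i) <;>
      simp [hc, condC, List.append_assoc]
  · rw [facLoopA, dif_neg h, PySem.List.pyRange_one_eq_nil (by omega)]
    simp
termination_by i => i.toNat
decreasing_by omega

-- key step: with facs = the prime divisors of n in [1, d), the all-test decides es_primo d
lemma cond_iff (n d : Int) (hd : 2 ≤ d) :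
    (PySem.Int.mod n d == 0 &&
      ((PySem.List.pyRange 1 d 1).filter (condC n)).all (fun p => !(PySem.Int.mod d p == 0)))
    = condC n d := by
  cases hm : (PySem.Int.mod n d == 0) with
  | false => simp [condC, hm]
  | true =>
    simp only [condC, hm, Bool.true_and]
    cases he : es_primo d with
    | true =>
      have hnd : NoDiv d := (es_primo_iff d hd).mp he
      rw [List.all_eq_true]
      intro p hp
      obtain ⟨hpr, hpc⟩ := List.mem_filter.mp hp
      obtain ⟨hp1, hpd⟩ := (PySem.List.mem_pyRange_one).mp hpr
      have hp2 : 2 ≤ p := by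
        rcases eq_or_lt_of_le hp1 with rfl | h2
        · rw [condC, es_primo_one] at hpc; simp at hpc
        · omega
      have : ¬ p ∣ d := hnd p hp2 hpd
      simp [PySem.Int.mod_eq_zero_iff_dvd, this]
    | false =>
      have hnd : ¬ NoDiv d := fun hc => by
        rw [(es_primo_iff d hd).mpr hc] at he; cases he
      obtain ⟨k, hk2, hkd, hkdvd, hknd⟩ :=
        exists_noDiv_divisor d.toNat d le_rfl hd hnd
      have hdn : d ∣ n := (PySem.Int.mod_eq_zero_iff_dvd n d).mp (by simpa using hm)
      have hkmem : k ∈ (PySem.List.pyRange 1 d 1).filter (condC n) := by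
        rw [List.mem_filter, PySem.List.mem_pyRange_one]
        refine ⟨⟨by omega, hkd⟩, ?_⟩
        rw [condC, (es_primo_iff k hk2).mpr hknd]
        have : PySem.Int.mod n k = 0 :=
          (PySem.Int.mod_eq_zero_iff_dvd n k).mpr (hkdvd.trans hdn)
        simp [this]
      rw [Bool.eq_false_iff]
      intro hall
      rw [List.all_eq_true] at hall
      have := hall k hkmem
      have hz : PySem.Int.mod d k = 0 := (PySem.Int.mod_eq_zero_iff_dvd d k).mpr hkdvd
      simp [hz] at this

-- loop B invariant: starting from the prime divisors in [1, d), B finishes the filter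
lemma facLoopB_eq (n : Int) :
    ∀ (d : Int), 2 ≤ d →
      facLoopB n d ((PySem.List.pyRange 1 d 1).filter (condC n)) =
        (PySem.List.pyRange 1 (max d n) 1).filter (condC n) := by
  intro d hd
  by_cases h : d < n
  · rw [facLoopB, dif_pos h, cond_iff n d hd]
    have hstep :
        (if condC n d = true
         then ((PySem.List.pyRange 1 d 1).filter (condC n)) ++ [d]
         else ((PySem.List.pyRange 1 d 1).filter (condC n)))
        = (PySem.List.pyRange 1 (d + 1) 1).filter (condC n) := by
      rw [PySem.List.pyRange_one_succ_right (show (1 : Int) ≤ d by omega),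
        List.filter_append]
      cases hc : condC n d <;> simp [hc]
    rw [hstep, facLoopB_eq n (d + 1) (by omega)]
    rw [max_eq_right (show d + 1 ≤ n by omega), max_eq_right (show d ≤ n by omega)]
  · rw [facLoopB, dif_neg h, max_eq_left (by omega)]
termination_by d => (n - d).toNat
decreasing_by omega

lemma filter_pyRange_12 (n : Int) :
    (PySem.List.pyRange 1 2 1).filter (condC n) = [] := by
  have h12 : PySem.List.pyRange 1 2 1 = [1] := by decide
  simp [h12, condC, es_primo_one, List.filter]

-- ===== VERDICT (by name: the statement is the Claim_ definition above) =====
theorem factoresp_spec : Claim_equal_factoresp := by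
  intro n _
  unfold Spec_factoresp factoresp factoresp_alt
  rw [facLoopA_eq n (n - 1) [], show n - 1 + 1 = n by ring, List.nil_append]
  have hB : facLoopB n 2 [] =
      (PySem.List.pyRange 1 (max 2 n) 1).filter (condC n) := by
    rw [← filter_pyRange_12 n]
    exact facLoopB_eq n 2 le_rfl
  rw [hB]
  rcases le_or_gt n 2 with hn | hn
  · rw [max_eq_left hn]
    rcases eq_or_lt_of_le hn with rfl | hn1
    · rfl
    · rw [PySem.List.pyRange_one_eq_nil (show n ≤ (1 : Int) by omega),
        filter_pyRange_12]
      rfl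
  · rw [max_eq_right (by omega)]
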